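-- pv_equiv track=rewrite | github.com/ReliableSecurity/advanced-security-scanner | src/plugins/plugin_manager.py | _find_exploit_indicators
-- ===== SOURCE A (Python) =====
-- from typing import Dict, List, Any, Optional, Callable
--
-- def _find_exploit_indicators(descriptions: List[str]) -> List[str]:
--     """Find indicators of available exploits in descriptions"""
--     exploit_indicators = [
--         'exploit available', 'proof of concept', 'poc', 'metasploit',
--         'exploit-db', 'public exploit', 'working exploit', 'exploit code'
--     ]
--
--     found_indicators = []
--     for desc in descriptions:
--         desc_lower = desc.lower()
--         for indicator in exploit_indicators:
--             if indicator in desc_lower: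
--                 found_indicators.append(indicator)
--
--     return list(set(found_indicators))
-- ===== SOURCE B (Python) =====
-- def _find_exploit_indicators(descriptions):
--     """Find indicators of available exploits in descriptions"""
--     exploit_indicators = [
--         'exploit available', 'proof of concept', 'poc', 'metasploit',
--         'exploit-db', 'public exploit', 'working exploit', 'exploit code'
--     ]
--     lowered = [d.lower() for d in descriptions]
--     return sorted(ind for ind in exploit_indicators
--                   if any(ind in d for d in lowered))
-- ===== Notes on version B (the rewrite author's own statement) =====
-- stated objective: alternative
-- what changed: Inverts the loop nesting: each of the 8 indicators is tested once against the lowered descriptions with a short-circuiting any(), so no hit accumulator and no set-dedup pass is needed, and the result is emitted sorted (A's list(set(...)) order is hash-arbitrary over the same element set).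
import Mathlib
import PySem

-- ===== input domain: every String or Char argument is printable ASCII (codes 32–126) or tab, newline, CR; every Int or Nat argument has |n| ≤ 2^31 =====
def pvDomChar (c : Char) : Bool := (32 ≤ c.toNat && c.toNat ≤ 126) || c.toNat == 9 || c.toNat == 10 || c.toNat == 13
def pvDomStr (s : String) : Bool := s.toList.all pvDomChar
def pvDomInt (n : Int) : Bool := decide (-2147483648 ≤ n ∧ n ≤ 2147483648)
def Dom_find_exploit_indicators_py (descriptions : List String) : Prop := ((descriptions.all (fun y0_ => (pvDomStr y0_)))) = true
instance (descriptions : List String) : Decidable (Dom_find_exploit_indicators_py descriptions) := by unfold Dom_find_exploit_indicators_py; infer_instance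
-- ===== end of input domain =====

-- B inverts the loop nesting (indicator-outer, short-circuiting any over the lowered
-- descriptions) and emits the matched indicators sorted, with no accumulator and no dedup pass
-- (objective: alternative). Python's list(set(...)) iteration order is hash-arbitrary; outputs
-- are compared as finite sets, and both ports emit the canonical sorted enumeration of the set.

-- the shared literal table of the 8 indicator phrases (same in A and B)
def pvIndicators : List String :=
  ["exploit available", "proof of concept", "poc", "metasploit",
   "exploit-db", "public exploit", "working exploit", "exploit code"]

-- ===== PORT A =====
-- list(set(found_indicators)): set iteration order is not modelled; ported as the sorted
-- enumeration of the distinct elements (exact as a set, which is how the output is compared).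
def find_exploit_indicators_py (descriptions : List String) : List String :=
  let found : List String :=
    descriptions.foldl (fun acc desc =>
      let descLower := PySem.Str.lower desc
      pvIndicators.foldl (fun acc2 indicator =>
        if PySem.Str.isIn indicator descLower then acc2 ++ [indicator] else acc2) acc) []
  PySem.List.sorted (PySem.Set.ofList found) (fun x => x) false

-- ===== PORT B =====
def find_exploit_indicators_py_alt (descriptions : List String) : List String :=
  let lowered := descriptions.map PySem.Str.lower
  PySem.List.sorted
    (pvIndicators.filter (fun ind => lowered.any (fun d => PySem.Str.isIn ind d)))
    (fun x => x) false

-- ===== PRECONDITION & SPEC =====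
def Spec_find_exploit_indicators_py (descriptions : List String) (out : List String) : Prop := out = find_exploit_indicators_py_alt descriptions
instance (descriptions : List String) (out : List String) : Decidable (Spec_find_exploit_indicators_py descriptions out) := by unfold Spec_find_exploit_indicators_py; infer_instance

-- ===== CLAIM (what is proved, stated in full; the proofs are below) =====
def Claim_equal_find_exploit_indicators_py : Prop := ∀ (descriptions : List String), Dom_find_exploit_indicators_py descriptions → Spec_find_exploit_indicators_py descriptions (find_exploit_indicators_py descriptions)

-- ===== LEMMAS AND PROOFS =====

-- A's accumulated hit list, flattened: desc-major collection of every matching indicator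
theorem pv_found_eq (descriptions : List String) :
    descriptions.foldl (fun acc desc =>
      pvIndicators.foldl (fun acc2 indicator =>
        if PySem.Str.isIn indicator (PySem.Str.lower desc) then acc2 ++ [indicator] else acc2) acc) [] =
    descriptions.flatMap (fun desc =>
      pvIndicators.filter (fun indicator => PySem.Str.isIn indicator (PySem.Str.lower desc))) := by
  have h : ∀ acc, descriptions.foldl (fun acc desc =>
      pvIndicators.foldl (fun acc2 indicator =>
        if PySem.Str.isIn indicator (PySem.Str.lower desc) then acc2 ++ [indicator] else acc2) acc) acc =
      acc ++ descriptions.flatMap (fun desc =>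
        pvIndicators.filter (fun indicator => PySem.Str.isIn indicator (PySem.Str.lower desc))) := by
    induction descriptions with
    | nil => simp
    | cons d t ih =>
      intro acc
      simp only [List.foldl_cons, List.flatMap_cons]
      rw [PySem.List.foldl_append_if_eq_filter, ih, List.append_assoc]
  simpa using h []

-- both sides collect the same SET of indicators
theorem pv_mem_iff (descriptions : List String) (x : String) :
    (x ∈ PySem.Set.ofList (descriptions.flatMap (fun desc =>
        pvIndicators.filter (fun indicator => PySem.Str.isIn indicator (PySem.Str.lower desc))))) ↔
    x ∈ pvIndicators.filter (fun ind =>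
        (descriptions.map PySem.Str.lower).any (fun d => PySem.Str.isIn ind d)) := by
  simp [PySem.Set.mem_ofList, List.mem_flatMap, List.mem_filter, List.any_eq_true]
  tauto

theorem pv_nodup_indicators : pvIndicators.Nodup := by decide

-- ===== VERDICT (by name: the statement is the Claim_ definition above) =====
theorem find_exploit_indicators_py_spec : Claim_equal_find_exploit_indicators_py := by
  intro descriptions _
  unfold Spec_find_exploit_indicators_py find_exploit_indicators_py find_exploit_indicators_py_alt
  simp only [pv_found_eq]
  apply (PySem.List.sorted_id_eq_sorted_id_iff_perm _ _).mpr
  apply (List.perm_ext_iff_of_nodup (PySem.Set.nodup_ofList _) (pv_nodup_indicators.filter _)).mpr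
  intro x
  simpa using pv_mem_iff descriptions x
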